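-- pv_equiv track=rewrite | github.com/pypi-data/pypi-mirror-345 | packages/madcubapy/madcubapy-0.6.1.tar.gz/madcubapy-0.6.1/madcubapy/io/madcubamap.py | _fix_unit_string_multiple_slashes
-- ===== SOURCE A (Python) =====
-- def _fix_unit_string_multiple_slashes(unit_str):
--     """
--     This function converts dots to spaces and slashes to '-1' exponents if the
--     BUNIT card contains more than one slash.
--     """
--     result = []
--     # Split by slashes
--     terms = unit_str.split('/')
--     # The entire first term is in the numerator, no correction for a slash must
--     # be applied. Split the units and append to a list.
--     first_sub_terms = terms[0].split('.')
--     result.extend(first_sub_terms)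
--     # Process terms after slashes
--     for term in terms[1:]:
--         # Split units and append a -1 to the first one because now it is a unit
--         # after a slash and append the rest without changes because they are
--         # preceeded by dots.
--         sub_terms = term.split('.')
--         result.append(f"{sub_terms[0]}-1")
--         result.extend(sub_terms[1:])
--     # Join all terms with a space
--     return ' '.join(result)
-- ===== SOURCE B (Python) =====
-- def _fix_unit_string_multiple_slashes(unit_str):
--     # One flat pass over the characters: a pending flag remembers whether the
--     # token being emitted was preceded by a slash; exponent marker is flushed when the
--     # token ends (at the next separator or at the end of the string).
--     out = []
--     pending = False
--     for c in unit_str: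
--         if c == '.' or c == '/':
--             if pending:
--                 out.append('-1')
--             out.append(' ')
--             pending = (c == '/')
--         else:
--             out.append(c)
--     if pending:
--         out.append('-1')
--     return ''.join(out)
-- ===== Notes on version B (the rewrite author's own statement) =====
-- stated objective: simpler
-- what changed: Replaced A's nested slash-split then dot-split passes (with special-casing of the first term and first sub-term) by a single flat scan over the characters that keeps a pending-slash flag and flushes the exponent marker when the token after a slash ends.
import Mathlib
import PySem

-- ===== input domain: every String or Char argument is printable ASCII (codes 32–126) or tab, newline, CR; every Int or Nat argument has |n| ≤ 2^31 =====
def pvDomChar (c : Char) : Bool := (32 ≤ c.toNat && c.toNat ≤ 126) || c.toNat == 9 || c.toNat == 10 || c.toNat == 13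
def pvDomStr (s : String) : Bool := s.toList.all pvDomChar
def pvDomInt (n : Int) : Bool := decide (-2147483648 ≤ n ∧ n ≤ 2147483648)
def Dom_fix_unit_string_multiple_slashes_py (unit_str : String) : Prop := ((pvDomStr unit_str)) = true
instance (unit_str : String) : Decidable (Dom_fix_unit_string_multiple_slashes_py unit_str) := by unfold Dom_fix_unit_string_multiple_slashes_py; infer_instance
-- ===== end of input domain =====

-- B replaces A's nested slash-split / dot-split passes by one flat scan over the
-- characters that tracks whether the current token follows a slash (objective: simpler).

-- ===== PORT A =====
def fix_unit_string_multiple_slashes_py (unit_str : String) : String :=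
  let terms := PySem.Chars.splitOn unit_str.toList ['/']
  let result := PySem.Chars.splitOn (terms.headD []) ['.']
  let result := terms.tail.foldl
    (fun acc term =>
      let sub_terms := PySem.Chars.splitOn term ['.']
      (acc ++ [sub_terms.headD [] ++ ['-', '1']]) ++ sub_terms.tail)
    result
  String.ofList (PySem.Chars.join [' '] result)

-- ===== PORT B =====
def fix_unit_string_multiple_slashes_py_alt (unit_str : String) : String :=
  let r := unit_str.toList.foldl
    (fun (st : List Char × Bool) c =>
      if c = '.' ∨ c = '/' then
        ((if st.2 then st.1 ++ ['-', '1'] else st.1) ++ [' '], c == '/')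
      else
        (st.1 ++ [c], st.2))
    ([], false)
  String.ofList (if r.2 then r.1 ++ ['-', '1'] else r.1)

-- ===== PRECONDITION & SPEC =====
def Spec_fix_unit_string_multiple_slashes_py (unit_str : String) (out : String) : Prop := out = fix_unit_string_multiple_slashes_py_alt unit_str
instance (unit_str : String) (out : String) : Decidable (Spec_fix_unit_string_multiple_slashes_py unit_str out) := by unfold Spec_fix_unit_string_multiple_slashes_py; infer_instance

-- ===== CLAIM (what is proved, stated in full; the proofs are below) =====
def Claim_equal_fix_unit_string_multiple_slashes_py : Prop := ∀ (unit_str : String), Dom_fix_unit_string_multiple_slashes_py unit_str → Spec_fix_unit_string_multiple_slashes_py unit_str (fix_unit_string_multiple_slashes_py unit_str)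

-- ===== LEMMAS AND PROOFS =====

-- split on a single character, in direct-recursion form
def split1 (c : Char) : List Char → List (List Char)
  | [] => [[]]
  | a :: rest =>
    if a = c then [] :: split1 c rest
    else (a :: (split1 c rest).headD []) :: (split1 c rest).tail

lemma split1_ne_nil (c : Char) (l : List Char) : split1 c l ≠ [] := by
  cases l with
  | nil => simp [split1]
  | cons a rest => simp only [split1]; split_ifs <;> simp

lemma cons_headD_tail {α : Type} (l : List α) (h : l ≠ []) (d : α) :
    l.headD d :: l.tail = l := by
  cases l with
  | nil => exact absurd rfl h
  | cons a t => rfl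

lemma go_single (c : Char) : ∀ (fuel : Nat) (l cur : List Char) (acc : List (List Char)),
    l.length < fuel →
    PySem.Chars.splitOn.go [c] fuel l cur acc
      = acc.reverse ++ ((cur.reverse ++ (split1 c l).headD []) :: (split1 c l).tail) := by
  intro fuel
  induction fuel with
  | zero => intro l cur acc h; omega
  | succ fuel ih =>
    intro l cur acc h
    cases l with
    | nil => simp [PySem.Chars.splitOn.go, split1]
    | cons a rest =>
      by_cases hac : a = c
      · subst hac
        have hpre : List.isPrefixOf [a] (a :: rest) = true := by simp [List.isPrefixOf]
        rw [PySem.Chars.splitOn.go, if_pos hpre]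
        have hinst := ih rest [] (cur.reverse :: acc) (by simpa using Nat.lt_of_succ_lt_succ h)
        rw [show List.drop (List.length [a]) (a :: rest) = rest from rfl, hinst]
        rw [show split1 a (a :: rest) = [] :: split1 a rest by simp [split1]]
        simp
        simpa using cons_headD_tail _ (split1_ne_nil a rest) ([] : List Char)
      · have hpre : List.isPrefixOf [c] (a :: rest) = false := by
          simp [List.isPrefixOf, Ne.symm hac]
        rw [PySem.Chars.splitOn.go, if_neg (by simp [hpre])]
        have hinst := ih rest (a :: cur) acc (by simpa using Nat.lt_of_succ_lt_succ h)
        rw [hinst]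
        simp [split1, hac]

lemma splitOn_single (c : Char) (l : List Char) :
    PySem.Chars.splitOn l [c] = split1 c l := by
  unfold PySem.Chars.splitOn
  rw [go_single c (l.length + 1) l [] [] (by omega)]
  simpa using cons_headD_tail (split1 c l) (split1_ne_nil c l) []

-- the intended output, computed by direct recursion with a pending flag
def emitF (p : Bool) : List Char → List Char
  | [] => if p then ['-', '1'] else []
  | a :: rest =>
    if a = '.' ∨ a = '/' then
      (if p then ['-', '1'] else []) ++ ' ' :: emitF (a == '/') rest
    else a :: emitF p rest

-- A's piece list for one term: split on dots, '-1' on the first piece iff marked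
def aFirst : Bool → List Char → List (List Char)
  | true, t0 => ((split1 '.' t0).headD [] ++ ['-', '1']) :: (split1 '.' t0).tail
  | false, t0 => split1 '.' t0

-- the pieces A builds for the terms after a slash
def gpieces : List (List Char) → List (List Char)
  | [] => []
  | t :: ts => aFirst true t ++ gpieces ts

lemma aFirst_ne_nil (p : Bool) (t : List Char) : aFirst p t ≠ [] := by
  cases p
  · exact split1_ne_nil '.' t
  · simp [aFirst]

-- A's whole output as a function of the character list; p says whether the
-- first term is the one right after a slash (so its first sub-term gets '-1')
def aOut (p : Bool) (cs : List Char) : List Char :=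
  PySem.Chars.join [' ']
    (aFirst p ((split1 '/' cs).headD []) ++ gpieces ((split1 '/' cs).tail))

lemma join_cons_ne_nil (x : List Char) (L : List (List Char)) (h : L ≠ []) :
    PySem.Chars.join [' '] (x :: L) = x ++ ' ' :: PySem.Chars.join [' '] L := by
  cases L with
  | nil => exact absurd rfl h
  | cons y l => rw [PySem.Chars.join_cons_cons]; simp

lemma join_head_cons (a : Char) (x : List Char) (L : List (List Char)) :
    PySem.Chars.join [' '] ((a :: x) :: L) = a :: PySem.Chars.join [' '] (x :: L) := by
  cases L with
  | nil => rw [PySem.Chars.join_singleton, PySem.Chars.join_singleton]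
  | cons y l => rw [PySem.Chars.join_cons_cons, PySem.Chars.join_cons_cons]; rfl

lemma aOut_eq_emitF (cs : List Char) : ∀ p, aOut p cs = emitF p cs := by
  induction cs with
  | nil =>
    intro p
    cases p <;>
      simp [aOut, aFirst, split1, gpieces, emitF, PySem.Chars.join_singleton]
  | cons a rest ih =>
    intro p
    by_cases hslash : a = '/'
    · subst hslash
      unfold aOut
      rw [show split1 '/' ('/' :: rest) = [] :: split1 '/' rest by simp [split1]]
      simp only [List.headD_cons, List.tail_cons]
      rw [← cons_headD_tail _ (split1_ne_nil '/' rest) ([] : List Char),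
          show ∀ t ts, gpieces (t :: ts) = aFirst true t ++ gpieces ts from fun _ _ => rfl]
      have hL : aFirst true ((split1 '/' rest).headD []) ++ gpieces ((split1 '/' rest).tail) ≠ [] := by
        cases htt : aFirst true ((split1 '/' rest).headD []) with
        | nil => exact absurd htt (aFirst_ne_nil _ _)
        | cons z zs => simp
      have hrest : PySem.Chars.join [' ']
          (aFirst true ((split1 '/' rest).headD []) ++ gpieces ((split1 '/' rest).tail))
          = emitF true rest := ih true
      cases p
      · rw [show aFirst false [] = [[]] from rfl, List.singleton_append,
            join_cons_ne_nil _ _ hL, hrest]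
        simp [emitF]
      · rw [show aFirst true [] = [['-', '1']] from rfl, List.singleton_append,
            join_cons_ne_nil _ _ hL, hrest]
        simp [emitF]
    · by_cases hdot : a = '.'
      · subst hdot
        unfold aOut
        rw [show split1 '/' ('.' :: rest)
              = ('.' :: (split1 '/' rest).headD []) :: (split1 '/' rest).tail by simp [split1]]
        simp only [List.headD_cons, List.tail_cons]
        have hsp : split1 '.' ('.' :: (split1 '/' rest).headD [])
            = [] :: split1 '.' ((split1 '/' rest).headD []) := by simp [split1]
        have hL : split1 '.' ((split1 '/' rest).headD []) ++ gpieces ((split1 '/' rest).tail) ≠ [] := by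
          cases htt : split1 '.' ((split1 '/' rest).headD []) with
          | nil => exact absurd htt (split1_ne_nil _ _)
          | cons z zs => simp
        have hrest : PySem.Chars.join [' ']
            (split1 '.' ((split1 '/' rest).headD []) ++ gpieces ((split1 '/' rest).tail))
            = emitF false rest := ih false
        cases p
        · rw [show aFirst false ('.' :: (split1 '/' rest).headD [])
                = [] :: split1 '.' ((split1 '/' rest).headD []) from by
              simp only [aFirst, hsp]]
          rw [List.cons_append, join_cons_ne_nil _ _ hL, hrest]
          simp [emitF]
        · rw [show aFirst true ('.' :: (split1 '/' rest).headD [])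
                = ['-', '1'] :: split1 '.' ((split1 '/' rest).headD []) from by
              simp only [aFirst, hsp]; rfl]
          rw [List.cons_append, join_cons_ne_nil _ _ hL, hrest]
          simp [emitF]
      · have hsep : ¬ (a = '.' ∨ a = '/') := by tauto
        unfold aOut
        rw [show split1 '/' (a :: rest)
              = (a :: (split1 '/' rest).headD []) :: (split1 '/' rest).tail by
            simp [split1, hslash]]
        simp only [List.headD_cons, List.tail_cons]
        have hsp : split1 '.' (a :: (split1 '/' rest).headD [])
            = (a :: (split1 '.' ((split1 '/' rest).headD [])).headD [])
              :: (split1 '.' ((split1 '/' rest).headD [])).tail := by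
          simp [split1, hdot]
        cases p
        · have hrest : PySem.Chars.join [' ']
              (aFirst false ((split1 '/' rest).headD []) ++ gpieces ((split1 '/' rest).tail))
              = emitF false rest := ih false
          rw [show aFirst false (a :: (split1 '/' rest).headD [])
                = (a :: (split1 '.' ((split1 '/' rest).headD [])).headD [])
                  :: (split1 '.' ((split1 '/' rest).headD [])).tail from hsp]
          rw [List.cons_append, join_head_cons]
          rw [show (split1 '.' ((split1 '/' rest).headD [])).headD []
                :: ((split1 '.' ((split1 '/' rest).headD [])).tail
                  ++ gpieces ((split1 '/' rest).tail))
              = (split1 '.' ((split1 '/' rest).headD [])).headD []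
                :: (split1 '.' ((split1 '/' rest).headD [])).tail
                ++ gpieces ((split1 '/' rest).tail) from by simp]
          rw [cons_headD_tail _ (split1_ne_nil '.' _) ([] : List Char)]
          rw [show aFirst false ((split1 '/' rest).headD [])
                = split1 '.' ((split1 '/' rest).headD []) from rfl] at hrest
          rw [hrest]
          simp [emitF, hsep]
        · have hrest : PySem.Chars.join [' ']
              (aFirst true ((split1 '/' rest).headD []) ++ gpieces ((split1 '/' rest).tail))
              = emitF true rest := ih true
          rw [show aFirst true (a :: (split1 '/' rest).headD [])
                = (a :: ((split1 '.' ((split1 '/' rest).headD [])).headD [] ++ ['-', '1']))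
                  :: (split1 '.' ((split1 '/' rest).headD [])).tail from by
              rw [aFirst, hsp]; simp]
          rw [List.cons_append, join_head_cons]
          rw [show ((split1 '.' ((split1 '/' rest).headD [])).headD [] ++ ['-', '1'])
                :: ((split1 '.' ((split1 '/' rest).headD [])).tail
                  ++ gpieces ((split1 '/' rest).tail))
              = aFirst true ((split1 '/' rest).headD [])
                ++ gpieces ((split1 '/' rest).tail) from by
              rw [aFirst]; simp]
          rw [hrest]
          simp [emitF, hsep]

lemma foldl_gpieces (ts : List (List Char)) (init : List (List Char)) :
    ts.foldl (fun acc term =>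
        (acc ++ [(split1 '.' term).headD [] ++ ['-', '1']])
          ++ (split1 '.' term).tail) init
      = init ++ gpieces ts := by
  induction ts generalizing init with
  | nil => simp [gpieces]
  | cons t ts ih => rw [List.foldl_cons, ih]; simp [gpieces, aFirst]

lemma b_fold (cs : List Char) : ∀ (acc : List Char) (p : Bool),
    (let r := cs.foldl
      (fun (st : List Char × Bool) c =>
        if c = '.' ∨ c = '/' then
          ((if st.2 then st.1 ++ ['-', '1'] else st.1) ++ [' '], c == '/')
        else
          (st.1 ++ [c], st.2)) (acc, p)
     if r.2 then r.1 ++ ['-', '1'] else r.1) = acc ++ emitF p cs := by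
  induction cs with
  | nil => intro acc p; cases p <;> simp [emitF]
  | cons a rest ih =>
    intro acc p
    by_cases h : a = '.' ∨ a = '/'
    · simp only [List.foldl_cons, if_pos h, emitF, ih]
      cases p <;> simp
    · simp only [List.foldl_cons, if_neg h, emitF, ih]
      simp

-- ===== VERDICT (by name: the statement is the Claim_ definition above) =====
theorem fix_unit_string_multiple_slashes_py_spec : Claim_equal_fix_unit_string_multiple_slashes_py := by
  intro s _
  unfold Spec_fix_unit_string_multiple_slashes_py
  unfold fix_unit_string_multiple_slashes_py fix_unit_string_multiple_slashes_py_alt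
  simp only [splitOn_single]
  rw [foldl_gpieces]
  apply congrArg String.ofList
  rw [b_fold s.toList [] false, List.nil_append]
  have h := aOut_eq_emitF s.toList false
  unfold aOut at h
  rw [show aFirst false ((split1 '/' s.toList).headD [])
        = split1 '.' ((split1 '/' s.toList).headD []) from rfl] at h
  exact h
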